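-- pv_equiv track=rewrite | github.com/blues/notecard-schema | scripts/generate_mdx_from_schema.py | get_api_order_number
-- ===== SOURCE A (Python) =====
-- def get_api_order_number(api_base_name, all_apis_in_category):
--     """Get a sequential order number for API within its category."""
--     # Get all APIs in the same category
--     category = api_base_name.split('.')[0]
--     category_apis = [api for api in all_apis_in_category if api.startswith(category + '.') or api == category]
--
--     # Sort APIs with special handling for bare category names
--     def sort_key(api):
--         parts = api.split('.')
--         if len(parts) == 1:
--             # Bare category API (like "web") - sort first with empty suffix
--             return ("",)
--         else:
--             # Regular API (like "web.delete") - sort by suffix parts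
--             return tuple(parts[1:])
--
--     category_apis.sort(key=sort_key)
--
--     # Find the position of this API in the sorted list
--     try:
--         position = category_apis.index(api_base_name)
--     except ValueError:
--         position = 0
--
--     # Generate sequential numbers: 00, 05, 10, 15, 20, etc.
--     return position * 5
-- ===== SOURCE B (Python) =====
-- def get_api_order_number(api_base_name, all_apis_in_category):
--     """Get a sequential order number for API within its category."""
--     category = api_base_name.partition('.')[0]
--
--     def sort_key(api):
--         head, dot, rest = api.partition('.')
--         return tuple(rest.split('.')) if dot else ("",)
--
--     target = sort_key(api_base_name)
--     found = False
--     smaller = 0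
--     for api in all_apis_in_category:
--         if api == category or api.startswith(category + '.'):
--             if api == api_base_name:
--                 found = True
--             if sort_key(api) < target:
--                 smaller += 1
--     return 5 * smaller if found else 0
-- ===== Notes on version B (the rewrite author's own statement) =====
-- stated objective: simpler
-- what changed: B makes a single fold over the raw input with a (found, smaller-count) accumulator -- no filtered list, no sorted copy, no .index/try-except -- computing the rank as the number of in-category APIs with a strictly smaller sort key, with the key built via partition instead of split-and-slice.
-- outside the precondition, e.g. on get_api_order_number('web', ['web.', 'web']): A returns 5, B returns 0
import Mathlib
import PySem

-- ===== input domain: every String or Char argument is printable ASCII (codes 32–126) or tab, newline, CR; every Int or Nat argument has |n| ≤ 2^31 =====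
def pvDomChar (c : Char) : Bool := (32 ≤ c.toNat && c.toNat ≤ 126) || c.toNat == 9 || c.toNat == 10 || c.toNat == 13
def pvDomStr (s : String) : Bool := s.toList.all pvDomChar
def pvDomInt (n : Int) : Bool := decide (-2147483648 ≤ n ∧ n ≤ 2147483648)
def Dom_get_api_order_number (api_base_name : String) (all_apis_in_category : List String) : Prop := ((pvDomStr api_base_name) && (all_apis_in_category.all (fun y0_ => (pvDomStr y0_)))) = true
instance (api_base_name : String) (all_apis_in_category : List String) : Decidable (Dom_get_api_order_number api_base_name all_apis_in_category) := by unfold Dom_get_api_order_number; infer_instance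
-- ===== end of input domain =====

-- B replaces filter+sort+.index by one fold with a (found, smaller-count) accumulator; objective: simpler.

-- ===== PORT A =====
-- A's sort_key helper: split('.'), bare name -> ("",), else the suffix parts
def pvSortKey (api : String) : List String :=
  let parts := (PySem.Str.split? api ".").getD []   -- sep "." is nonempty, so split? never returns none
  if parts.length = 1 then [""] else parts.tail

def get_api_order_number (api_base_name : String) (all_apis_in_category : List String) : Int :=
  -- category = api_base_name.split('.')[0]; split('.') is always nonempty, so [0] is headD
  let category := ((PySem.Str.split? api_base_name ".").getD []).headD ""
  let category_apis := all_apis_in_category.filter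
    (fun api => PySem.Str.startswith api (category ++ ".") || api == category)
  let sorted_apis := PySem.List.sorted category_apis pvSortKey false
  let position : Int :=
    match PySem.List.index? sorted_apis api_base_name with
    | some k => (k : Int)        -- category_apis.index(api_base_name)
    | none => 0                  -- except ValueError: position = 0
  position * 5

-- ===== PORT B =====
-- B's sort_key: head, dot, rest = api.partition('.'); tuple(rest.split('.')) if dot else ("",)
-- hand port of str.partition + str.split('.') at the character level; exact on all inputs
def pvSortKeyB (api : String) : List String :=
  if api.toList.contains '.' then
    (((api.toList.dropWhile (fun c => c != '.')).tail).splitOn '.').map String.ofList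
  else [""]

def get_api_order_number_alt (api_base_name : String) (all_apis_in_category : List String) : Int :=
  -- category = api_base_name.partition('.')[0]: the characters before the first '.', hand-ported exactly
  let category := String.ofList (api_base_name.toList.takeWhile (fun c => c != '.'))
  let target := pvSortKeyB api_base_name
  let r := all_apis_in_category.foldl
    (fun (st : Bool × Nat) api =>
      if api == category || PySem.Str.startswith api (category ++ ".") then
        (st.1 || api == api_base_name, if pvSortKeyB api < target then st.2 + 1 else st.2)
      else st)
    (false, 0)
  if r.1 then 5 * (r.2 : Int) else 0

-- ===== PRECONDITION & SPEC =====
-- Pre_ excludes inputs where api_base_name and the list both realise the one sort-key tie between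
-- two DISTINCT strings — the bare category and category+'.' (empty suffix) — where A's result is
-- an accident of stable-sort tie order; B breaks that unspecified tie the other way.
def Pre_get_api_order_number (api_base_name : String) (all_apis_in_category : List String) : Prop :=
  let category := ((PySem.Str.split? api_base_name ".").getD []).headD ""
  ¬ ((api_base_name = category ∨ api_base_name = category ++ ".") ∧
     category ∈ all_apis_in_category ∧ (category ++ ".") ∈ all_apis_in_category)
instance (api_base_name : String) (all_apis_in_category : List String) : Decidable (Pre_get_api_order_number api_base_name all_apis_in_category) := by unfold Pre_get_api_order_number; infer_instance

def pvWitness_get_api_order_number : String × List String := ("web.get", ["web.get", "web", "web.delete"])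

def Spec_get_api_order_number (api_base_name : String) (all_apis_in_category : List String) (out : Int) : Prop := out = get_api_order_number_alt api_base_name all_apis_in_category
instance (api_base_name : String) (all_apis_in_category : List String) (out : Int) : Decidable (Spec_get_api_order_number api_base_name all_apis_in_category out) := by unfold Spec_get_api_order_number; infer_instance

-- ===== CLAIM (what is proved, stated in full; the proofs are below) =====
def Claim_equal_get_api_order_number : Prop := ∀ (api_base_name : String) (all_apis_in_category : List String), Dom_get_api_order_number api_base_name all_apis_in_category → Pre_get_api_order_number api_base_name all_apis_in_category → Spec_get_api_order_number api_base_name all_apis_in_category (get_api_order_number api_base_name all_apis_in_category)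

-- ===== LEMMAS AND PROOFS =====

theorem pvWitness_ok : Dom_get_api_order_number pvWitness_get_api_order_number.1 pvWitness_get_api_order_number.2 ∧ Pre_get_api_order_number pvWitness_get_api_order_number.1 pvWitness_get_api_order_number.2 := by decide

-- PySem.Chars.splitOn with a one-char separator is core's List.splitOn (fuel invariant of go)
theorem pvGo_spec (c : Char) : ∀ (fuel : Nat) (l cur : List Char) (acc : List (List Char)),
    l.length < fuel →
    PySem.Chars.splitOn.go [c] fuel l cur acc
      = acc.reverse ++ (l.splitOn c).modifyHead (fun h => cur.reverse ++ h) := by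
  intro fuel
  induction fuel with
  | zero => intro l cur acc h; omega
  | succ n ih =>
    intro l cur acc h
    cases l with
    | nil =>
      rw [PySem.Chars.splitOn.go.eq_def]
      simp [List.splitOn]
    | cons x rest =>
      rw [PySem.Chars.splitOn.go.eq_def]
      have hrest : rest.length < n := by simpa using h
      by_cases hcx : c = x
      · subst hcx
        simp only [List.isPrefixOf, BEq.rfl, Bool.true_and, if_pos, List.length_cons,
          List.length_nil, List.drop_succ_cons, List.drop_zero]
        rw [ih rest [] (cur.reverse :: acc) hrest]
        simp [List.splitOn, List.splitOnP_cons, show (fun h : List Char => h) = id from rfl,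
          List.modifyHead_id]
      · have hpf : ([c].isPrefixOf (x :: rest)) = false := by
          simp [List.isPrefixOf]
          exact fun hc => absurd hc hcx
        simp only [hpf, Bool.false_eq_true, if_false]
        rw [ih rest (x :: cur) acc hrest]
        have hne := List.splitOnP_ne_nil (fun a => a == c) rest
        rcases List.exists_cons_of_ne_nil hne with ⟨hd, tl, heq⟩
        simp [List.splitOn, List.splitOnP_cons, heq, beq_iff_eq, Ne.symm hcx]

theorem pvSplitOn_char (s : List Char) (c : Char) :
    PySem.Chars.splitOn s [c] = s.splitOn c := by
  have h := pvGo_spec c (s.length + 1) s [] [] (by omega)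
  have hne := List.splitOnP_ne_nil (fun a => a == c) s
  rcases List.exists_cons_of_ne_nil (by simpa [List.splitOn] using hne) with ⟨hd, tl, heq⟩
  simp [PySem.Chars.splitOn, h, show (fun h : List Char => h) = id from rfl, List.modifyHead_id]

theorem pvSplit?_dot (s : String) :
    PySem.Str.split? s "." = some ((s.toList.splitOn '.').map String.ofList) := by
  simp [PySem.Str.split?, PySem.Chars.split?, show (".".toList) = ['.'] from rfl, pvSplitOn_char]

-- the head component of a split contains no separator
theorem pvHead_no_sep (c : Char) (s : List Char) : c ∉ (s.splitOn c).headD [] := by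
  induction s with
  | nil => simp [List.splitOn]
  | cons x t ih =>
    simp only [List.splitOn] at ih ⊢
    by_cases hx : x = c
    · simp [List.splitOnP_cons, hx]
    · have hne := List.splitOnP_ne_nil (fun a => a == c) t
      rcases List.exists_cons_of_ne_nil hne with ⟨hd, tl, heq⟩
      rw [List.splitOnP_cons, heq]
      rw [heq] at ih
      simp only [beq_iff_eq, hx, if_false]
      simp only [List.modifyHead, List.headD_cons, List.mem_cons, not_or] at ih ⊢
      exact ⟨fun h => hx h.symm, ih⟩

-- the head component of a split is the longest separator-free prefix
theorem pvHead_takeWhile (c : Char) : ∀ s : List Char,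
    (s.splitOn c).headD [] = s.takeWhile (fun x => x != c) := by
  intro s
  induction s with
  | nil => simp [List.splitOn]
  | cons x t ih =>
    simp only [List.splitOn] at ih ⊢
    by_cases hx : x = c
    · simp [List.splitOnP_cons, hx, List.takeWhile_cons]
    · have hne := List.splitOnP_ne_nil (fun a => a == c) t
      rcases List.exists_cons_of_ne_nil hne with ⟨hd, tl, heq⟩
      rw [List.splitOnP_cons, heq]
      rw [heq] at ih
      simp only [beq_iff_eq, hx, if_false, List.modifyHead, List.headD_cons] at ih ⊢
      simp [List.takeWhile_cons, hx, ih]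

-- decomposition at the first separator
theorem pvSplitAtDot (c : Char) : ∀ l : List Char, c ∈ l →
    l = l.takeWhile (fun x => x != c) ++ c :: (l.dropWhile (fun x => x != c)).tail := by
  intro l
  induction l with
  | nil => intro h; simp at h
  | cons x t ih =>
    intro h
    by_cases hx : x = c
    · subst hx; simp [List.takeWhile_cons, List.dropWhile_cons]
    · have hct : c ∈ t := by rcases List.mem_cons.mp h with h | h; exact absurd h.symm hx; exact h
      have := ih hct
      simp only [List.takeWhile_cons, List.dropWhile_cons, bne_iff_ne, ne_eq, hx,
        not_false_eq_true, if_true, List.cons_append]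
      exact congrArg (x :: ·) this

theorem pvSortKey_of_single (s : String) (h : '.' ∉ s.toList) : pvSortKey s = [""] := by
  have hs : s.toList.splitOn '.' = [s.toList] := by
    simp only [List.splitOn]
    exact List.splitOnP_eq_single _ _ (by intro x hx; simp; exact fun hc => h (hc ▸ hx))
  simp [pvSortKey, pvSplit?_dot, hs]

theorem pvSortKey_of_prefix (s : String) (h r : List Char) (hs : s.toList = h ++ '.' :: r)
    (hh : '.' ∉ h) : pvSortKey s = (r.splitOn '.').map String.ofList := by
  have hsplit : s.toList.splitOn '.' = h :: r.splitOn '.' := by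
    rw [hs]
    simp only [List.splitOn]
    exact List.splitOnP_first _ _ (by intro x hx; simp; exact fun hc => hh (hc ▸ hx)) _ (by simp) _
  have hne := List.splitOnP_ne_nil (fun a => a == '.') r
  rcases List.exists_cons_of_ne_nil (show r.splitOn '.' ≠ [] from hne) with ⟨hd, tl, heq⟩
  simp [pvSortKey, pvSplit?_dot, hsplit, heq]

-- B's partition-based key equals A's split-based key
theorem pvSortKeyB_eq (s : String) : pvSortKeyB s = pvSortKey s := by
  by_cases h : '.' ∈ s.toList
  · have hd := pvSplitAtDot '.' s.toList h
    have hh : '.' ∉ s.toList.takeWhile (fun x => x != '.') := by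
      intro hm
      have := List.mem_takeWhile_imp hm
      simp at this
    rw [pvSortKeyB, if_pos (by simpa using h), pvSortKey_of_prefix s _ _ hd hh]
  · rw [pvSortKeyB, if_neg (by simpa using h), pvSortKey_of_single s h]

theorem pvOfList_injEq {u v : List (List Char)} (h : u.map String.ofList = v.map String.ofList) :
    u = v := by
  have := congrArg (List.map String.toList) h
  simpa [List.map_map, Function.comp_def, String.toList_ofList] using this

-- two distinct strings of category shape share a sort key only in the bare/"category." tie
theorem pvKey_shape (cat y z : String) (hc : '.' ∉ cat.toList)
    (hy : y = cat ∨ (cat.toList ++ ['.']) <+: y.toList)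
    (hz : z = cat ∨ (cat.toList ++ ['.']) <+: z.toList)
    (hk : pvSortKey y = pvSortKey z) (hne : y ≠ z) :
    (y = cat ∧ z = cat ++ ".") ∨ (y = cat ++ "." ∧ z = cat) := by
  have hts : ∀ w : String, (cat.toList ++ ['.']) <+: w.toList →
      ∃ r, w.toList = cat.toList ++ '.' :: r := by
    intro w ⟨t, ht⟩
    exact ⟨t, by rw [← ht]; simp⟩
  have hdotcat : (cat ++ ".").toList = cat.toList ++ '.' :: [] := by simp
  rcases hy with hy | hy <;> rcases hz with hz | hz
  · exact absurd (hy.trans hz.symm) hne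
  · rcases hts z hz with ⟨r, hr⟩
    rw [hy, pvSortKey_of_single cat hc, pvSortKey_of_prefix z _ _ hr hc] at hk
    have : ([[]] : List (List Char)).map String.ofList = (r.splitOn '.').map String.ofList := by
      simpa using hk
    have hsp : r.splitOn '.' = [[]] := (pvOfList_injEq this).symm
    have hrnil : r = [] := by
      have := List.intercalate_splitOn r '.'
      rw [hsp] at this
      simpa [List.intercalate] using this.symm
    left
    refine ⟨hy, ?_⟩
    rw [← String.toList_inj, hdotcat, hr, hrnil]
  · rcases hts y hy with ⟨r, hr⟩
    rw [hz, pvSortKey_of_single cat hc, pvSortKey_of_prefix y _ _ hr hc] at hk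
    have : (r.splitOn '.').map String.ofList = ([[]] : List (List Char)).map String.ofList := by
      simpa using hk
    have hsp : r.splitOn '.' = [[]] := pvOfList_injEq this
    have hrnil : r = [] := by
      have := List.intercalate_splitOn r '.'
      rw [hsp] at this
      simpa [List.intercalate] using this.symm
    right
    refine ⟨?_, hz⟩
    rw [← String.toList_inj, hdotcat, hr, hrnil]
  · rcases hts y hy with ⟨r1, hr1⟩
    rcases hts z hz with ⟨r2, hr2⟩
    rw [pvSortKey_of_prefix y _ _ hr1 hc, pvSortKey_of_prefix z _ _ hr2 hc] at hk
    have hsp := pvOfList_injEq hk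
    have hr12 : r1 = r2 := by
      have h1 := List.intercalate_splitOn r1 '.'
      have h2 := List.intercalate_splitOn r2 '.'
      rw [← h1, ← h2, hsp]
    exact absurd (by rw [← String.toList_inj, hr1, hr2, hr12]) hne

-- in a key-sorted list, the index of an element unique for its key counts the strictly smaller keys
theorem pvRank {α κ : Type} [BEq α] [LawfulBEq α] [LinearOrder κ] (key : α → κ) :
    ∀ (l : List α) (a : α), l.Pairwise (fun x y => key x ≤ key y) → a ∈ l →
    (∀ y ∈ l, key y = key a → y = a) →
    PySem.List.index? l a = some (l.countP (fun y => decide (key y < key a))) := by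
  intro l
  induction l with
  | nil => intro a _ ha _; simp at ha
  | cons x t ih =>
    intro a hp ha hinj
    rcases List.pairwise_cons.mp hp with ⟨hhead, htail⟩
    by_cases hx : x = a
    · subst hx
      rw [PySem.List.index?_cons_self]
      have h0 : (x :: t).countP (fun y => decide (key y < key x)) = 0 := by
        rw [List.countP_eq_zero]
        intro y hy
        simp only [decide_eq_true_eq, not_lt]
        rcases List.mem_cons.mp hy with rfl | hyt
        · exact le_refl _
        · exact hhead y hyt
      rw [h0]
    · have hat : a ∈ t := (List.mem_cons.mp ha).resolve_left (fun h => hx h.symm)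
      have hlt : key x < key a := by
        rcases lt_or_eq_of_le (hhead a hat) with h | h
        · exact h
        · exact absurd (hinj x (List.mem_cons_self) h) hx
      rw [PySem.List.index?_cons_of_ne (h := hx)]
      rw [ih a htail hat (fun y hy hk => hinj y (List.mem_cons_of_mem _ hy) hk)]
      simp [hlt, Nat.add_comm]

-- pairwise order of the port's sorted term (bridges the DecidableLT instance)
theorem pvPair (l : List String) (k : String → List String) :
    (PySem.List.sorted l k false).Pairwise (fun x y => k x ≤ k y) := by
  have h := PySem.List.sorted_pairwise (κ := List String) l k
  convert h using 2

-- B's single fold computes membership of a and the strictly-smaller count over the filtered list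
theorem pvFold_spec (p : String → Bool) (Q : String → Prop) [DecidablePred Q] (a : String) :
    ∀ (xs : List String) (b : Bool) (n : Nat),
      xs.foldl (fun (st : Bool × Nat) api =>
          if p api then (st.1 || api == a, if Q api then st.2 + 1 else st.2) else st) (b, n)
        = (b || (xs.filter p).contains a, n + (xs.filter p).countP (fun y => decide (Q y))) := by
  intro xs
  induction xs with
  | nil => intro b n; simp
  | cons x t ih =>
    intro b n
    rw [List.foldl_cons]
    by_cases hp : p x = true
    · rw [if_pos hp, ih, List.filter_cons, if_pos hp, List.contains_cons, List.countP_cons]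
      simp only [Prod.mk.injEq]
      constructor
      · simp only [Bool.or_assoc]
        by_cases hxa : x = a
        · rw [hxa]
        · have h1 : (x == a) = false := by simp [hxa]
          have h2 : (a == x) = false := by simp [Ne.symm hxa]
          rw [h1, h2]
      · by_cases hq : Q x
        · simp only [if_pos hq, decide_eq_true hq, if_true]; omega
        · simp [hq]
    · rw [if_neg hp, ih, List.filter_cons, if_neg hp]

-- ===== VERDICT (by name: the statement is the Claim_ definition above) =====
theorem get_api_order_number_spec : Claim_equal_get_api_order_number := by
  intro a xs _ hpre0
  set cat := ((PySem.Str.split? a ".").getD []).headD "" with hcatdef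
  set capis := xs.filter (fun api => PySem.Str.startswith api (cat ++ ".") || api == cat)
    with hcapdef
  have hpre : ¬((a = cat ∨ a = cat ++ ".") ∧ cat ∈ xs ∧ (cat ++ ".") ∈ xs) := hpre0
  show get_api_order_number a xs = get_api_order_number_alt a xs
  -- facts about cat
  have hne0 : a.toList.splitOn '.' ≠ [] := by
    simpa [List.splitOn] using List.splitOnP_ne_nil (fun x => x == '.') a.toList
  rcases List.exists_cons_of_ne_nil hne0 with ⟨h0, t0, heq⟩
  have hctl : cat.toList = h0 := by
    rw [hcatdef, pvSplit?_dot, heq]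
    simp [String.toList_ofList]
  have hc : '.' ∉ cat.toList := by
    rw [hctl]
    have := pvHead_no_sep '.' a.toList
    rw [heq] at this
    simpa using this
  -- B's partition-based category equals A's split-based one
  have hcatB : String.ofList (a.toList.takeWhile (fun c => c != '.')) = cat := by
    have ht : a.toList.takeWhile (fun c => c != '.') = h0 := by
      have := pvHead_takeWhile '.' a.toList
      rw [heq] at this
      simpa using this.symm
    rw [ht, ← hctl, String.ofList_toList]
  have hA : get_api_order_number a xs
      = (match PySem.List.index? (PySem.List.sorted capis pvSortKey false) a with
          | some k => ((k : Nat) : Int)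
          | none => 0) * 5 := rfl
  have hB : get_api_order_number_alt a xs
      = if capis.contains a then
          5 * ((capis.countP (fun api => decide (pvSortKey api < pvSortKey a))) : Int)
        else 0 := by
    show (let category := String.ofList (a.toList.takeWhile (fun c => c != '.'))
          let target := pvSortKeyB a
          let r := xs.foldl
            (fun (st : Bool × Nat) api =>
              if api == category || PySem.Str.startswith api (category ++ ".") then
                (st.1 || api == a, if pvSortKeyB api < target then st.2 + 1 else st.2)
              else st) (false, 0)
          if r.1 then 5 * (r.2 : Int) else 0) = _
    simp only [hcatB]
    rw [pvFold_spec (fun api => api == cat || PySem.Str.startswith api (cat ++ "."))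
        (fun api => pvSortKeyB api < pvSortKeyB a) a xs false 0]
    have hfil : xs.filter (fun api => api == cat || PySem.Str.startswith api (cat ++ "."))
        = capis := by
      rw [hcapdef]
      exact List.filter_congr (fun api _ => Bool.or_comm _ _)
    have hq : (fun api => decide (pvSortKeyB api < pvSortKeyB a))
        = (fun api => decide (pvSortKey api < pvSortKey a)) := by
      funext api
      rw [pvSortKeyB_eq, pvSortKeyB_eq]
    simp only [hfil, hq, Bool.false_or, Nat.zero_add]
  rw [hA, hB]
  -- members of the filtered list have category shape
  have hshape : ∀ y ∈ capis, y = cat ∨ (cat.toList ++ ['.']) <+: y.toList := by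
    intro y hy
    have hp := (List.mem_filter.mp hy).2
    rcases Bool.or_eq_true_iff.mp hp with h | h
    · right
      have hpre : (cat ++ ".").toList <+: y.toList := by
        have := PySem.Chars.startswith_iff y.toList (cat ++ ".").toList
        simp only [PySem.Str.startswith_eq] at h
        exact this.mp h
      simpa using hpre
    · left
      exact eq_of_beq h
  by_cases hmem : a ∈ capis
  · -- api present: both sides count strictly smaller keys
    have hinj : ∀ y ∈ capis, pvSortKey y = pvSortKey a → y = a := by
      intro y hy hk
      by_contra hne
      have hyx : y ∈ xs := (List.mem_filter.mp hy).1
      have hax : a ∈ xs := (List.mem_filter.mp hmem).1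
      rcases pvKey_shape cat y a hc (hshape y hy) (hshape a hmem) hk hne with ⟨h1, h2⟩ | ⟨h1, h2⟩
      · exact hpre ⟨Or.inr h2, h1 ▸ hyx, h2 ▸ hax⟩
      · exact hpre ⟨Or.inl h2, h2 ▸ hax, h1 ▸ hyx⟩
    have hmemS : a ∈ PySem.List.sorted capis pvSortKey false :=
      (PySem.List.mem_sorted capis pvSortKey false a).mpr hmem
    have hinjS : ∀ y ∈ PySem.List.sorted capis pvSortKey false,
        pvSortKey y = pvSortKey a → y = a := by
      intro y hy
      exact hinj y ((PySem.List.mem_sorted capis pvSortKey false y).mp hy)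
    have hidx := pvRank pvSortKey _ a (pvPair capis pvSortKey) hmemS hinjS
    have hcnt : (PySem.List.sorted capis pvSortKey false).countP
          (fun y => @decide (pvSortKey y < pvSortKey a)
            (LinearOrder.toDecidableLT (pvSortKey y) (pvSortKey a)))
        = capis.countP (fun y => decide (pvSortKey y < pvSortKey a)) := by
      rw [(PySem.List.sorted_perm capis pvSortKey false).countP_eq]
      exact List.countP_congr (fun y _ => by simp)
    rw [hidx, hcnt]
    have hcontains : capis.contains a = true := by
      simpa using hmem
    rw [if_pos hcontains]
    ring
  · -- api absent: the index lookup fails and both sides are 0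
    have hnone : PySem.List.index? (PySem.List.sorted capis pvSortKey false) a = none := by
      rw [PySem.List.index?_eq_none_iff]
      exact fun h => hmem ((PySem.List.mem_sorted capis pvSortKey false a).mp h)
    rw [hnone]
    rw [if_neg (by simpa using hmem)]
    ring
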